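-- pv_equiv track=rewrite | github.com/pypi-data/pypi-mirror-389 | packages/lexorank4py/lexorank4py-0.1.0.tar.gz/lexorank4py-0.1.0/lexorank/__init__.py | int_to_rank_with_length
-- ===== SOURCE A (Python) =====
-- BASE36 = "0123456789abcdefghijklmnopqrstuvwxyz"
--
-- def int_to_rank_with_length(value: int, length: int) -> str:
--     """
--     eg:
--     - int_to_rank_with_length(10, 2) -> "0a"
--     - int_to_rank_with_length(35, 2) -> "0z"
--     - int_to_rank_with_length(36, 2) -> "10"
--     """
--     if value < 0:
--         raise ValueError("Value must be non-negative")
--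
--     if value == 0:
--         result = "0"
--     else:
--         digits = []
--         temp = value
--         while temp > 0:
--             temp, rem = divmod(temp, 36)
--             digits.append(BASE36[rem])
--         result = "".join(reversed(digits))
--     # fill 0 at the left till the length is reached
--     if len(result) < length:
--         result = "0" * (length - len(result)) + result
--
--     return result
-- ===== SOURCE B (Python) =====
-- BASE36 = "0123456789abcdefghijklmnopqrstuvwxyz"
--
-- def int_to_rank_with_length(value: int, length: int) -> str:
--     if value < 0:
--         raise ValueError("Value must be non-negative")
--     # count the base-36 digits of value (1 for 0)
--     d, t = 1, value
--     while t >= 36: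
--         t //= 36
--         d += 1
--     width = max(d, length)
--     # emit the d significant digits MSB-first by positional extraction
--     # (value // 36**i) % 36 — no divmod accumulation, no reversal —
--     # and prepend the remaining width-d padding zeros arithmetically
--     return "0" * (width - d) + "".join(
--         BASE36[(value // 36 ** i) % 36] for i in range(d - 1, -1, -1))
-- ===== Notes on version B (the rewrite author's own statement) =====
-- stated objective: alternative
-- what changed: A extracts digits LSB-first with a divmod accumulation loop, reverses the list, then left-pads in a separate step; B first counts the digits d with a division loop, sets width=max(d,length), and emits the d digits MSB-first by positional extraction BASE36[(value // 36**i) % 36], prefixed by width-d padding zeros — no digit list, no reversal.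
import Mathlib
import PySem

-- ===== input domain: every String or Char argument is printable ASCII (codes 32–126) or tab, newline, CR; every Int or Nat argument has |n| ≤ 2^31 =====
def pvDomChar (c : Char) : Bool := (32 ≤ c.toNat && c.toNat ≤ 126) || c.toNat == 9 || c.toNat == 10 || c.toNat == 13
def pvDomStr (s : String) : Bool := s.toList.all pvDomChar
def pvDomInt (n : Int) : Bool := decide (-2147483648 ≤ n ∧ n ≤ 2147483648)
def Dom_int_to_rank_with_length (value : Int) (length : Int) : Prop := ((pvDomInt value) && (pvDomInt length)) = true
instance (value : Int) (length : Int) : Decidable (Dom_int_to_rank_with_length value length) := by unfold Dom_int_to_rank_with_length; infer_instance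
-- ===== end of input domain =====

-- B replaces A's LSB-first divmod loop + reversal by: count the digits d, set
-- width = max(d, length), then emit the d digits MSB-first by positional
-- extraction (value // 36**i) % 36 after the padding (objective: alternative).
-- A raises ValueError on value < 0; those inputs are outside Pre_.

-- ===== PORT A =====
-- BASE36 string as a char list; BASE36[r]
def pvBASE36 : List Char := "0123456789abcdefghijklmnopqrstuvwxyz".toList
def pvB36 (r : Nat) : Char := pvBASE36.getD r '0'

-- A's while loop: digits collected LSB-first (temp, rem = divmod(temp, 36))
def pvLoopA (temp : Nat) : List Char :=
  if h : temp = 0 then [] else pvB36 (temp % 36) :: pvLoopA (temp / 36)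
termination_by temp
decreasing_by exact Nat.div_lt_self (Nat.pos_of_ne_zero h) (by norm_num)

def int_to_rank_with_length (value : Int) (length : Int) : String :=
  if value < 0 then ""  -- Python raises ValueError here; excluded by Pre_
  else
    let result : List Char :=
      if value = 0 then ['0'] else (pvLoopA value.toNat).reverse
    if (result.length : Int) < length then
      String.mk (List.replicate (length - result.length).toNat '0' ++ result)
    else String.mk result

-- ===== PORT B =====
-- B's digit-count loop: d, t = 1, value; while t >= 36: t //= 36; d += 1
def pvCountD (t : Nat) : Nat :=
  if h : 36 ≤ t then pvCountD (t / 36) + 1 else 1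
termination_by t
decreasing_by exact Nat.div_lt_self (by omega) (by norm_num)

-- B's MSB-first emit loop: for i in range(d-1, -1, -1) append BASE36[(value // 36**i) % 36];
-- pvBuild value k is the list for positions k-1 down to 0
def pvBuild (value : Nat) : Nat → List Char
  | 0 => []
  | k + 1 => pvB36 ((value / 36 ^ k) % 36) :: pvBuild value k

def int_to_rank_with_length_alt (value : Int) (length : Int) : String :=
  if value < 0 then ""  -- Python raises ValueError here; excluded by Pre_
  else
    let d : Int := pvCountD value.toNat
    let width : Int := max d length
    String.mk (List.replicate (width - d).toNat '0' ++ pvBuild value.toNat (pvCountD value.toNat))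

-- ===== PRECONDITION & SPEC =====
-- A raises ValueError exactly when value < 0; Pre_ excludes those inputs.
def Pre_int_to_rank_with_length (value : Int) (length : Int) : Prop := 0 ≤ value
instance (value : Int) (length : Int) : Decidable (Pre_int_to_rank_with_length value length) := by unfold Pre_int_to_rank_with_length; infer_instance
def pvWitness_int_to_rank_with_length : Int × Int := (37, 4)

def Spec_int_to_rank_with_length (value : Int) (length : Int) (out : String) : Prop := out = int_to_rank_with_length_alt value length
instance (value : Int) (length : Int) (out : String) : Decidable (Spec_int_to_rank_with_length value length out) := by unfold Spec_int_to_rank_with_length; infer_instance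

-- ===== CLAIM (what is proved, stated in full; the proofs are below) =====
def Claim_equal_int_to_rank_with_length : Prop := ∀ (value : Int) (length : Int), Dom_int_to_rank_with_length value length → Pre_int_to_rank_with_length value length → Spec_int_to_rank_with_length value length (int_to_rank_with_length value length)

-- ===== LEMMAS AND PROOFS =====

-- the count loop measures A's digit list (1 digit for value 0)
theorem lenLoopA (n : Nat) (hn : 0 < n) : (pvLoopA n).length = pvCountD n := by
  induction n using Nat.strong_induction_on with
  | _ n ih =>
    rw [pvLoopA, pvCountD]
    have hne : n ≠ 0 := Nat.pos_iff_ne_zero.mp hn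
    simp only [hne, dif_neg, not_false_iff, List.length_cons]
    by_cases h36 : 36 ≤ n
    · rw [dif_pos h36, ← ih (n / 36) (Nat.div_lt_self hn (by norm_num))
        (Nat.div_pos h36 (by norm_num))]
    · rw [dif_neg h36]
      have : n / 36 = 0 := Nat.div_eq_of_lt (by omega)
      rw [this, pvLoopA]
      simp

-- value fits in pvCountD value digits
theorem lt_pow_countD (n : Nat) : n < 36 ^ pvCountD n := by
  induction n using Nat.strong_induction_on with
  | _ n ih =>
    rw [pvCountD]
    by_cases h36 : 36 ≤ n
    · rw [dif_pos h36]
      have h := ih (n / 36) (Nat.div_lt_self (by omega) (by norm_num))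
      rw [pow_succ]
      exact (Nat.div_lt_iff_lt_mul (by norm_num : 0 < 36)).mp h
    · rw [dif_neg h36]; simpa using (by omega : n < 36)

-- peel B's last (LSB) position instead of its first
theorem buildSnoc (n : Nat) : ∀ k, pvBuild n (k + 1) = pvBuild (n / 36) k ++ [pvB36 (n % 36)] := by
  intro k
  induction k with
  | zero => simp [pvBuild]
  | succ k ih =>
    show pvB36 ((n / 36 ^ (k + 1)) % 36) :: pvBuild n (k + 1) = _
    rw [ih]
    have : n / 36 ^ (k + 1) = (n / 36) / 36 ^ k := by
      rw [Nat.div_div_eq_div_mul, pow_succ, Nat.mul_comm]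
    rw [this]
    rfl

-- B's positional emit equals A's reversed digit list, zero-padded to k
theorem build_eq (k : Nat) : ∀ n, n < 36 ^ k →
    pvBuild n k = List.replicate (k - (pvLoopA n).length) '0' ++ (pvLoopA n).reverse := by
  induction k with
  | zero =>
    intro n hn
    have : n = 0 := by simpa using hn
    subst this
    rw [pvLoopA]; simp [pvBuild]
  | succ k ih =>
    intro n hn
    rw [buildSnoc]
    by_cases h0 : n = 0
    · subst h0
      rw [ih 0 (Nat.pow_pos (by norm_num))]
      have h36 : pvB36 (0 % 36) = '0' := by decide
      rw [h36]
      simp [pvLoopA, List.replicate_succ']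
    · rw [ih (n / 36) (by
        rw [pow_succ, Nat.mul_comm] at hn
        exact Nat.div_lt_of_lt_mul hn)]
      conv_rhs => rw [pvLoopA]
      simp only [h0, dif_neg, not_false_iff, List.length_cons, List.reverse_cons]
      rw [Nat.succ_sub_succ, List.append_assoc]

-- main agreement on a nonnegative value
theorem agree (n : Nat) (len : Int) :
    int_to_rank_with_length (n : Int) len = int_to_rank_with_length_alt (n : Int) len := by
  unfold int_to_rank_with_length int_to_rank_with_length_alt
  have hnn : ¬ ((n : Int) < 0) := Int.not_lt.mpr (Int.natCast_nonneg n)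
  simp only [hnn, if_false, Int.toNat_natCast]
  set d := pvCountD n with hd
  set L := pvLoopA n with hL
  -- A's pre-padding result is exactly pvBuild n d
  have hres : (if (n : Int) = 0 then ['0'] else L.reverse) = pvBuild n d := by
    by_cases h0 : n = 0
    · subst h0
      have hd1 : d = 1 := by rw [hd, pvCountD]; simp
      rw [hd1, if_pos (by norm_num), buildSnoc]
      simp [pvBuild]
      decide
    · rw [if_neg (by exact_mod_cast h0)]
      rw [build_eq d n (lt_pow_countD n), ← hL, lenLoopA n (Nat.pos_of_ne_zero h0), ← hd]
      simp
  -- the length of that result is d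
  have hlen : (if (n : Int) = 0 then ['0'] else L.reverse).length = d := by
    by_cases h0 : n = 0
    · subst h0
      rw [if_pos (by norm_num)]
      rw [hd, pvCountD]; simp
    · rw [if_neg (by exact_mod_cast h0)]
      rw [List.length_reverse, hL, lenLoopA n (Nat.pos_of_ne_zero h0), hd]
  rw [hres] at hlen ⊢
  by_cases hlt : ((pvBuild n d).length : Int) < len
  · rw [if_pos hlt]
    rw [hlen] at hlt
    have hmax : max (d : Int) len = len := by omega
    rw [hmax, hlen]
  · rw [if_neg hlt]
    rw [hlen] at hlt
    have hmax : max (d : Int) len = (d : Int) := by omega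
    rw [hmax]
    simp

-- ===== VERDICT (by name: the statement is the Claim_ definition above) =====
theorem int_to_rank_with_length_spec : Claim_equal_int_to_rank_with_length := by
  intro value length _ hpre
  unfold Spec_int_to_rank_with_length
  obtain ⟨n, rfl⟩ := Int.eq_ofNat_of_zero_le hpre
  exact agree n length
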